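-- pv_equiv track=rewrite | github.com/djcolantonio/PythonProjects | task zip codes.py | isZipCode
-- ===== SOURCE A (Python) =====
-- def isZipCode (text):
--     if len(text) !=12:
--         return False
--     for i in range (0,3):
--         if not text[i].isdecimal():
--             return False
--     if text[3] != '-':
--         return False
--     for i in range (4,7):
--         if not text[i].isdecimal():
--             return False
--     if text[7] != '-':
--             return False
--     for i in range (8,12):
--         if not text[i].isdecimal():
--             return False
--     return True
-- ===== SOURCE B (Python) =====
-- def isZipCode(text):
--     parts = text.split('-')
--     if len(parts) != 3:
--         return False
--     a, b, c = parts
--     return (len(a) == 3 and len(b) == 3 and len(c) == 4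
--             and a.isdecimal() and b.isdecimal() and c.isdecimal())
-- ===== Notes on version B (the rewrite author's own statement) =====
-- stated objective: simpler
-- what changed: B tokenizes the string by splitting on the dash separator and checks for exactly three all-decimal segments of lengths 3, 3 and 4, instead of A's character-by-character scan at hard-coded index positions.
import Mathlib
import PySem

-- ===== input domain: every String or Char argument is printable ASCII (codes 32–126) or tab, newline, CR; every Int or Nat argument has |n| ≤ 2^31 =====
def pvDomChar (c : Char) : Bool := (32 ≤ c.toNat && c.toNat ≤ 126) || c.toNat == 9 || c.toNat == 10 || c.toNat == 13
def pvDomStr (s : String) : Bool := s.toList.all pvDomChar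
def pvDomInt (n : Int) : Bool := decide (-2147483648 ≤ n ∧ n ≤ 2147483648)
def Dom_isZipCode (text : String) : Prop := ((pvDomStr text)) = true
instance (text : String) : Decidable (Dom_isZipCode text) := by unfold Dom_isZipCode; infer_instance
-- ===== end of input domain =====

-- B validates NNN-NNN-NNNN by splitting on '-' instead of A's index-by-index scan; simpler decomposition, same cost.
-- (.isdecimal() is ported as PySem.Chars.isdigit, exact on the ASCII domain Dom_isZipCode.)

-- ===== PORT A =====
def isZipCode (text : String) : Bool :=
  let cs := text.toList
  if cs.length ≠ 12 then false
  else if ¬ ((PySem.List.pyRange 0 3 1).all fun i => PySem.Chars.isdigit (PySem.List.pyGetD cs i ' ')) then false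
  else if PySem.List.pyGetD cs 3 ' ' ≠ '-' then false
  else if ¬ ((PySem.List.pyRange 4 7 1).all fun i => PySem.Chars.isdigit (PySem.List.pyGetD cs i ' ')) then false
  else if PySem.List.pyGetD cs 7 ' ' ≠ '-' then false
  else if ¬ ((PySem.List.pyRange 8 12 1).all fun i => PySem.Chars.isdigit (PySem.List.pyGetD cs i ' ')) then false
  else true

-- ===== PORT B =====
def isZipCode_alt (text : String) : Bool :=
  match PySem.Chars.splitOn text.toList ['-'] with
  | [a, b, c] =>
      a.length == 3 && b.length == 3 && c.length == 4 &&
      a.all PySem.Chars.isdigit && b.all PySem.Chars.isdigit && c.all PySem.Chars.isdigit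
  | _ => false

-- ===== PRECONDITION & SPEC =====
def Spec_isZipCode (text : String) (out : Bool) : Prop := out = isZipCode_alt text
instance (text : String) (out : Bool) : Decidable (Spec_isZipCode text out) := by unfold Spec_isZipCode; infer_instance

-- ===== CLAIM (what is proved, stated in full; the proofs are below) =====
def Claim_equal_isZipCode : Prop := ∀ (text : String), Dom_isZipCode text → Spec_isZipCode text (isZipCode text)

-- ===== LEMMAS AND PROOFS =====

lemma splitOn_go_eq (c : Char) : ∀ (fuel : Nat) (l cur : List Char) (acc : List (List Char)),
    l.length < fuel →
    PySem.Chars.splitOn.go [c] fuel l cur acc = acc.reverse ++ List.splitOnP.go (· == c) l cur := by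
  intro fuel
  induction fuel with
  | zero => intro l cur acc h; omega
  | succ n ih =>
    intro l cur acc h
    cases l with
    | nil => simp [PySem.Chars.splitOn.go, List.splitOnP.go]
    | cons a t =>
      rw [PySem.Chars.splitOn.go, List.splitOnP.go]
      by_cases hac : a = c
      · subst hac
        simp only [List.isPrefixOf, beq_self_eq_true, Bool.true_and, if_pos,
          List.length_cons, List.length_nil, List.drop_succ_cons, List.drop_zero]
        rw [ih t [] (List.reverse cur :: acc) (by simpa using Nat.lt_of_succ_lt_succ h)]
        simp
      · have h1 : ([c].isPrefixOf (a :: t)) = false := by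
          simp only [List.isPrefixOf, Bool.and_true, beq_eq_false_iff_ne, ne_eq]
          exact fun hh => hac hh.symm
        have h2 : (a == c) = false := by simp [hac]
        simp only [h1, h2, Bool.false_eq_true, ite_false]
        exact ih t (a :: cur) acc (by simpa using Nat.lt_of_succ_lt_succ h)

lemma splitOn_eq (c : Char) (cs : List Char) :
    PySem.Chars.splitOn cs [c] = cs.splitOn c := by
  unfold PySem.Chars.splitOn List.splitOn List.splitOnP
  rw [splitOn_go_eq c (cs.length + 1) cs [] [] (by omega)]
  simp

lemma digit_ne_dash {c : Char} (h : PySem.Chars.isdigit c = true) : c ≠ '-' := by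
  intro hc; subst hc; simp [PySem.Chars.isdigit] at h

lemma dash_not_mem {l : List Char} (h : ∀ x ∈ l, PySem.Chars.isdigit x = true) : '-' ∉ l :=
  fun hm => digit_ne_dash (h _ hm) rfl

lemma len_eq_twelve {l : List Char} (h : l.length = 12) :
    ∃ a b c d e f g h' i j k m, l = [a,b,c,d,e,f,g,h',i,j,k,m] := by
  rcases l with _ | ⟨a, _ | ⟨b, _ | ⟨c, _ | ⟨d, _ | ⟨e, _ | ⟨f, _ | ⟨g, _ | ⟨h1, _ | ⟨i, _ | ⟨j, _ | ⟨k, _ | ⟨m, _ | ⟨n, t⟩⟩⟩⟩⟩⟩⟩⟩⟩⟩⟩⟩⟩ <;> simp_all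

lemma len_eq_four {l : List Char} (h : l.length = 4) :
    ∃ a b c d, l = [a,b,c,d] := by
  rcases l with _ | ⟨a, _ | ⟨b, _ | ⟨c, _ | ⟨d, _ | ⟨e, t⟩⟩⟩⟩⟩ <;> simp_all

lemma len_eq_three {l : List Char} (h : l.length = 3) :
    ∃ a b c, l = [a,b,c] := by
  rcases l with _ | ⟨a, _ | ⟨b, _ | ⟨c, _ | ⟨d, t⟩⟩⟩⟩ <;> simp_all

lemma zip_list_eq (cs : List Char) :
    (if cs.length ≠ 12 then false
     else if ¬ ((PySem.List.pyRange 0 3 1).all fun i => PySem.Chars.isdigit (PySem.List.pyGetD cs i ' ')) then false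
     else if PySem.List.pyGetD cs 3 ' ' ≠ '-' then false
     else if ¬ ((PySem.List.pyRange 4 7 1).all fun i => PySem.Chars.isdigit (PySem.List.pyGetD cs i ' ')) then false
     else if PySem.List.pyGetD cs 7 ' ' ≠ '-' then false
     else if ¬ ((PySem.List.pyRange 8 12 1).all fun i => PySem.Chars.isdigit (PySem.List.pyGetD cs i ' ')) then false
     else true)
    = (match cs.splitOn '-' with
       | [a, b, c] =>
           a.length == 3 && b.length == 3 && c.length == 4 &&
           a.all PySem.Chars.isdigit && b.all PySem.Chars.isdigit && c.all PySem.Chars.isdigit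
       | _ => false) := by
  have hr1 : PySem.List.pyRange 0 3 1 = [0,1,2] := by decide
  have hr2 : PySem.List.pyRange 4 7 1 = [4,5,6] := by decide
  have hr3 : PySem.List.pyRange 8 12 1 = [8,9,10,11] := by decide
  rw [Bool.eq_iff_iff]
  constructor
  · intro hA
    by_cases hlen : cs.length = 12
    swap
    · simp [hlen] at hA
    obtain ⟨a,b,c,d,e,f,g,h1,i,j,k,m,rfl⟩ := len_eq_twelve hlen
    simp only [hr1, hr2, hr3, List.all_cons, List.all_nil] at hA
    simp [PySem.List.pyGetD, PySem.List.pyGet?, PySem.List.pyIdx?] at hA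
    obtain ⟨⟨ha, hb, hc⟩, rfl, ⟨he, hf, hg⟩, rfl, hi, hj, hk, hm⟩ := hA
    have hsplit : ([a,b,c,'-',e,f,g,'-',i,j,k,m] : List Char).splitOn '-' = [[a,b,c],[e,f,g],[i,j,k,m]] := by
      have hinter : ([a,b,c,'-',e,f,g,'-',i,j,k,m] : List Char)
          = (['-'] : List Char).intercalate [[a,b,c],[e,f,g],[i,j,k,m]] := by
        simp [List.intercalate]
      rw [hinter, List.splitOn_intercalate]
      · intro l hl
        simp only [List.mem_cons, List.not_mem_nil, or_false] at hl
        rcases hl with rfl | rfl | rfl <;>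
          exact dash_not_mem (fun x hx => by fin_cases hx <;> assumption)
      · simp
    rw [hsplit]
    simp [ha, hb, hc, he, hf, hg, hi, hj, hk, hm]
  · intro hB
    rcases hps : cs.splitOn '-' with _ | ⟨p1, _ | ⟨p2, _ | ⟨p3, _ | ⟨p4, t⟩⟩⟩⟩ <;>
      rw [hps] at hB <;> try simp at hB
    obtain ⟨⟨⟨⟨⟨h3a, h3b⟩, h4c⟩, hall1⟩, hall2⟩, hall3⟩ := hB
    obtain ⟨a, b, c, rfl⟩ := len_eq_three h3a
    obtain ⟨e, f, g, rfl⟩ := len_eq_three h3b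
    obtain ⟨i, j, k, m, rfl⟩ := len_eq_four h4c
    have hcs : cs = [a,b,c,'-',e,f,g,'-',i,j,k,m] := by
      have := List.intercalate_splitOn cs '-'
      rw [hps] at this
      rw [← this]
      simp [List.intercalate]
    subst hcs
    simp only [List.mem_cons, List.not_mem_nil, or_false, forall_eq_or_imp, forall_eq] at hall1 hall2 hall3
    obtain ⟨ha, hb, hc⟩ := hall1
    obtain ⟨he, hf, hg⟩ := hall2
    obtain ⟨hi, hj, hk, hm⟩ := hall3
    simp only [hr1, hr2, hr3, List.all_cons, List.all_nil]
    simp [PySem.List.pyGetD, PySem.List.pyGet?, PySem.List.pyIdx?,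
      ha, hb, hc, he, hf, hg, hi, hj, hk, hm]

-- ===== VERDICT (by name: the statement is the Claim_ definition above) =====
theorem isZipCode_spec : Claim_equal_isZipCode := by
  intro text _
  unfold Spec_isZipCode isZipCode isZipCode_alt
  rw [splitOn_eq]
  exact zip_list_eq _
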